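-- pv_equiv track=rewrite | github.com/stupidmonk37/setup | .bin/xt_find_c2c_connection.py | c2c_internal_connections_by_port
-- ===== SOURCE A (Python) =====
-- internal_connections = [
--     {"card1": 3, "connector1": 11, "card2": 1, "connector2": 11},
--     {"card1": 3, "connector1": 6, "card2": 2, "connector2": 12},
--     {"card1": 3, "connector1": 7, "card2": 0, "connector2": 14},
--     {"card1": 2, "connector1": 14, "card2": 1, "connector2": 12},
--     {"card1": 2, "connector1": 7, "card2": 0, "connector2": 13},
--     {"card1": 1, "connector1": 6, "card2": 0, "connector2": 12},
--     {"card1": 7, "connector1": 11, "card2": 5, "connector2": 11},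
--     {"card1": 7, "connector1": 6, "card2": 6, "connector2": 12},
--     {"card1": 7, "connector1": 7, "card2": 4, "connector2": 14},
--     {"card1": 6, "connector1": 14, "card2": 5, "connector2": 12},
--     {"card1": 6, "connector1": 7, "card2": 4, "connector2": 13},
--     {"card1": 5, "connector1": 6, "card2": 4, "connector2": 12},
--     {"card1": 7, "connector1": 14, "card2": 2, "connector2": 13},
--     {"card1": 7, "connector1": 13, "card2": 3, "connector2": 13},
--     {"card1": 7, "connector1": 12, "card2": 1, "connector2": 13},
--     {"card1": 7, "connector1": 8, "card2": 0, "connector2": 11},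
--     {"card1": 6, "connector1": 13, "card2": 3, "connector2": 14},
--     {"card1": 6, "connector1": 11, "card2": 1, "connector2": 14},
--     {"card1": 6, "connector1": 6, "card2": 2, "connector2": 6},
--     {"card1": 6, "connector1": 8, "card2": 0, "connector2": 6},
--     {"card1": 5, "connector1": 14, "card2": 2, "connector2": 11},
--     {"card1": 5, "connector1": 13, "card2": 3, "connector2": 12},
--     {"card1": 5, "connector1": 7, "card2": 1, "connector2": 7},
--     {"card1": 5, "connector1": 8, "card2": 0, "connector2": 7},
--     {"card1": 4, "connector1": 11, "card2": 3, "connector2": 8},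
--     {"card1": 4, "connector1": 7, "card2": 1, "connector2": 8},
--     {"card1": 4, "connector1": 6, "card2": 2, "connector2": 8},
--     {"card1": 4, "connector1": 8, "card2": 0, "connector2": 8},
-- ]
--
-- def c2c_internal_connections_by_port(card, connector):
--     """
--     Returns all internal links from (card, connector).
--     """
--     results = []
--     for conn in internal_connections:
--         if conn["card1"] == card and conn["connector1"] == connector:
--             results.append((card, connector, conn["card2"], conn["connector2"]))
--         elif conn["card2"] == card and conn["connector2"] == connector:
--             results.append((card, connector, conn["card1"], conn["connector1"]))
--     return results
-- ===== SOURCE B (Python) =====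
-- # The fixed table is a perfect matching of ports: each (card, connector) endpoint
-- # occurs in exactly one row, in one orientation.  So the data is stored directly as
-- # a symmetric peer map, and a call is a single dict lookup returning 0 or 1 links.
-- _peer = {
--     (3, 11): (1, 11),
--     (1, 11): (3, 11),
--     (3, 6): (2, 12),
--     (2, 12): (3, 6),
--     (3, 7): (0, 14),
--     (0, 14): (3, 7),
--     (2, 14): (1, 12),
--     (1, 12): (2, 14),
--     (2, 7): (0, 13),
--     (0, 13): (2, 7),
--     (1, 6): (0, 12),
--     (0, 12): (1, 6),
--     (7, 11): (5, 11),
--     (5, 11): (7, 11),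
--     (7, 6): (6, 12),
--     (6, 12): (7, 6),
--     (7, 7): (4, 14),
--     (4, 14): (7, 7),
--     (6, 14): (5, 12),
--     (5, 12): (6, 14),
--     (6, 7): (4, 13),
--     (4, 13): (6, 7),
--     (5, 6): (4, 12),
--     (4, 12): (5, 6),
--     (7, 14): (2, 13),
--     (2, 13): (7, 14),
--     (7, 13): (3, 13),
--     (3, 13): (7, 13),
--     (7, 12): (1, 13),
--     (1, 13): (7, 12),
--     (7, 8): (0, 11),
--     (0, 11): (7, 8),
--     (6, 13): (3, 14),
--     (3, 14): (6, 13),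
--     (6, 11): (1, 14),
--     (1, 14): (6, 11),
--     (6, 6): (2, 6),
--     (2, 6): (6, 6),
--     (6, 8): (0, 6),
--     (0, 6): (6, 8),
--     (5, 14): (2, 11),
--     (2, 11): (5, 14),
--     (5, 13): (3, 12),
--     (3, 12): (5, 13),
--     (5, 7): (1, 7),
--     (1, 7): (5, 7),
--     (5, 8): (0, 7),
--     (0, 7): (5, 8),
--     (4, 11): (3, 8),
--     (3, 8): (4, 11),
--     (4, 7): (1, 8),
--     (1, 8): (4, 7),
--     (4, 6): (2, 8),
--     (2, 8): (4, 6),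
--     (4, 8): (0, 8),
--     (0, 8): (4, 8),
-- }
--
-- def c2c_internal_connections_by_port(card, connector):
--     """
--     Returns all internal links from (card, connector).
--     """
--     peer = _peer.get((card, connector))
--     return [] if peer is None else [(card, connector, peer[0], peer[1])]
-- ===== Notes on version B (the rewrite author's own statement) =====
-- stated objective: faster
-- what changed: The fixed table is a perfect matching of ports, so B stores the data as a symmetric peer map (port -> peer port) and a call is one dict lookup producing an empty or one-element list, instead of A's per-call scan of all 28 rows with two orientation branches.
import Mathlib
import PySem

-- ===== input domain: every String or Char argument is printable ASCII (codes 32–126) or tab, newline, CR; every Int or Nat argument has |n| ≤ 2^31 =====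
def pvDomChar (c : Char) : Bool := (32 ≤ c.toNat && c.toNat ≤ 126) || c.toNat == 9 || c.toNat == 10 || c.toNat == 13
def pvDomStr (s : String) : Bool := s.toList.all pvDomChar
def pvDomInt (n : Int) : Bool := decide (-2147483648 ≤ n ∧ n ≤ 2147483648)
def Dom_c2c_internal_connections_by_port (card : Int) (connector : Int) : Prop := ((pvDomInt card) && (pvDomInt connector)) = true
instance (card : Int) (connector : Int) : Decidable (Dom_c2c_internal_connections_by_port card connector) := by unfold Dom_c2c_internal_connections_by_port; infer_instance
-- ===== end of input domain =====

-- B stores the fixed table (a perfect matching of ports) as a symmetric peer map, so a call is one dict lookup instead of A's scan of all rows (objective: faster, constant-factor).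

-- ===== PORT A =====
-- The module constant: a list of dicts with string keys (all four keys present in every row,
-- so porting conn["k"] as Dict.getD conn "k" 0 is exact on this fixed data).
def internal_connections : List (PySem.Dict String Int) := [
  PySem.Dict.ofList [("card1", (3 : Int)), ("connector1", 11), ("card2", 1), ("connector2", 11)],
  PySem.Dict.ofList [("card1", (3 : Int)), ("connector1", 6), ("card2", 2), ("connector2", 12)],
  PySem.Dict.ofList [("card1", (3 : Int)), ("connector1", 7), ("card2", 0), ("connector2", 14)],
  PySem.Dict.ofList [("card1", (2 : Int)), ("connector1", 14), ("card2", 1), ("connector2", 12)],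
  PySem.Dict.ofList [("card1", (2 : Int)), ("connector1", 7), ("card2", 0), ("connector2", 13)],
  PySem.Dict.ofList [("card1", (1 : Int)), ("connector1", 6), ("card2", 0), ("connector2", 12)],
  PySem.Dict.ofList [("card1", (7 : Int)), ("connector1", 11), ("card2", 5), ("connector2", 11)],
  PySem.Dict.ofList [("card1", (7 : Int)), ("connector1", 6), ("card2", 6), ("connector2", 12)],
  PySem.Dict.ofList [("card1", (7 : Int)), ("connector1", 7), ("card2", 4), ("connector2", 14)],
  PySem.Dict.ofList [("card1", (6 : Int)), ("connector1", 14), ("card2", 5), ("connector2", 12)],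
  PySem.Dict.ofList [("card1", (6 : Int)), ("connector1", 7), ("card2", 4), ("connector2", 13)],
  PySem.Dict.ofList [("card1", (5 : Int)), ("connector1", 6), ("card2", 4), ("connector2", 12)],
  PySem.Dict.ofList [("card1", (7 : Int)), ("connector1", 14), ("card2", 2), ("connector2", 13)],
  PySem.Dict.ofList [("card1", (7 : Int)), ("connector1", 13), ("card2", 3), ("connector2", 13)],
  PySem.Dict.ofList [("card1", (7 : Int)), ("connector1", 12), ("card2", 1), ("connector2", 13)],
  PySem.Dict.ofList [("card1", (7 : Int)), ("connector1", 8), ("card2", 0), ("connector2", 11)],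
  PySem.Dict.ofList [("card1", (6 : Int)), ("connector1", 13), ("card2", 3), ("connector2", 14)],
  PySem.Dict.ofList [("card1", (6 : Int)), ("connector1", 11), ("card2", 1), ("connector2", 14)],
  PySem.Dict.ofList [("card1", (6 : Int)), ("connector1", 6), ("card2", 2), ("connector2", 6)],
  PySem.Dict.ofList [("card1", (6 : Int)), ("connector1", 8), ("card2", 0), ("connector2", 6)],
  PySem.Dict.ofList [("card1", (5 : Int)), ("connector1", 14), ("card2", 2), ("connector2", 11)],
  PySem.Dict.ofList [("card1", (5 : Int)), ("connector1", 13), ("card2", 3), ("connector2", 12)],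
  PySem.Dict.ofList [("card1", (5 : Int)), ("connector1", 7), ("card2", 1), ("connector2", 7)],
  PySem.Dict.ofList [("card1", (5 : Int)), ("connector1", 8), ("card2", 0), ("connector2", 7)],
  PySem.Dict.ofList [("card1", (4 : Int)), ("connector1", 11), ("card2", 3), ("connector2", 8)],
  PySem.Dict.ofList [("card1", (4 : Int)), ("connector1", 7), ("card2", 1), ("connector2", 8)],
  PySem.Dict.ofList [("card1", (4 : Int)), ("connector1", 6), ("card2", 2), ("connector2", 8)],
  PySem.Dict.ofList [("card1", (4 : Int)), ("connector1", 8), ("card2", 0), ("connector2", 8)]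
]

def c2c_internal_connections_by_port (card : Int) (connector : Int) : List (Int × Int × Int × Int) :=
  internal_connections.foldl (fun results conn =>
    if PySem.Dict.getD conn "card1" 0 = card ∧ PySem.Dict.getD conn "connector1" 0 = connector then
      results ++ [(card, connector, PySem.Dict.getD conn "card2" 0, PySem.Dict.getD conn "connector2" 0)]
    else if PySem.Dict.getD conn "card2" 0 = card ∧ PySem.Dict.getD conn "connector2" 0 = connector then
      results ++ [(card, connector, PySem.Dict.getD conn "card1" 0, PySem.Dict.getD conn "connector1" 0)]
    else results) []

-- ===== PORT B =====
-- Source B's module constant _peer: the symmetric peer map, a dict literal.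
def pvPeer : PySem.Dict (Int × Int) (Int × Int) := PySem.Dict.ofList [
  (((3:Int), (11:Int)), ((1:Int), (11:Int))),
  (((1:Int), (11:Int)), ((3:Int), (11:Int))),
  (((3:Int), (6:Int)), ((2:Int), (12:Int))),
  (((2:Int), (12:Int)), ((3:Int), (6:Int))),
  (((3:Int), (7:Int)), ((0:Int), (14:Int))),
  (((0:Int), (14:Int)), ((3:Int), (7:Int))),
  (((2:Int), (14:Int)), ((1:Int), (12:Int))),
  (((1:Int), (12:Int)), ((2:Int), (14:Int))),
  (((2:Int), (7:Int)), ((0:Int), (13:Int))),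
  (((0:Int), (13:Int)), ((2:Int), (7:Int))),
  (((1:Int), (6:Int)), ((0:Int), (12:Int))),
  (((0:Int), (12:Int)), ((1:Int), (6:Int))),
  (((7:Int), (11:Int)), ((5:Int), (11:Int))),
  (((5:Int), (11:Int)), ((7:Int), (11:Int))),
  (((7:Int), (6:Int)), ((6:Int), (12:Int))),
  (((6:Int), (12:Int)), ((7:Int), (6:Int))),
  (((7:Int), (7:Int)), ((4:Int), (14:Int))),
  (((4:Int), (14:Int)), ((7:Int), (7:Int))),
  (((6:Int), (14:Int)), ((5:Int), (12:Int))),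
  (((5:Int), (12:Int)), ((6:Int), (14:Int))),
  (((6:Int), (7:Int)), ((4:Int), (13:Int))),
  (((4:Int), (13:Int)), ((6:Int), (7:Int))),
  (((5:Int), (6:Int)), ((4:Int), (12:Int))),
  (((4:Int), (12:Int)), ((5:Int), (6:Int))),
  (((7:Int), (14:Int)), ((2:Int), (13:Int))),
  (((2:Int), (13:Int)), ((7:Int), (14:Int))),
  (((7:Int), (13:Int)), ((3:Int), (13:Int))),
  (((3:Int), (13:Int)), ((7:Int), (13:Int))),
  (((7:Int), (12:Int)), ((1:Int), (13:Int))),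
  (((1:Int), (13:Int)), ((7:Int), (12:Int))),
  (((7:Int), (8:Int)), ((0:Int), (11:Int))),
  (((0:Int), (11:Int)), ((7:Int), (8:Int))),
  (((6:Int), (13:Int)), ((3:Int), (14:Int))),
  (((3:Int), (14:Int)), ((6:Int), (13:Int))),
  (((6:Int), (11:Int)), ((1:Int), (14:Int))),
  (((1:Int), (14:Int)), ((6:Int), (11:Int))),
  (((6:Int), (6:Int)), ((2:Int), (6:Int))),
  (((2:Int), (6:Int)), ((6:Int), (6:Int))),
  (((6:Int), (8:Int)), ((0:Int), (6:Int))),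
  (((0:Int), (6:Int)), ((6:Int), (8:Int))),
  (((5:Int), (14:Int)), ((2:Int), (11:Int))),
  (((2:Int), (11:Int)), ((5:Int), (14:Int))),
  (((5:Int), (13:Int)), ((3:Int), (12:Int))),
  (((3:Int), (12:Int)), ((5:Int), (13:Int))),
  (((5:Int), (7:Int)), ((1:Int), (7:Int))),
  (((1:Int), (7:Int)), ((5:Int), (7:Int))),
  (((5:Int), (8:Int)), ((0:Int), (7:Int))),
  (((0:Int), (7:Int)), ((5:Int), (8:Int))),
  (((4:Int), (11:Int)), ((3:Int), (8:Int))),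
  (((3:Int), (8:Int)), ((4:Int), (11:Int))),
  (((4:Int), (7:Int)), ((1:Int), (8:Int))),
  (((1:Int), (8:Int)), ((4:Int), (7:Int))),
  (((4:Int), (6:Int)), ((2:Int), (8:Int))),
  (((2:Int), (8:Int)), ((4:Int), (6:Int))),
  (((4:Int), (8:Int)), ((0:Int), (8:Int))),
  (((0:Int), (8:Int)), ((4:Int), (8:Int)))
]

def c2c_internal_connections_by_port_alt (card : Int) (connector : Int) : List (Int × Int × Int × Int) :=
  match PySem.Dict.get? pvPeer (card, connector) with
  | none => []
  | some p => [(card, connector, p.1, p.2)]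

-- ===== PRECONDITION & SPEC =====
def Spec_c2c_internal_connections_by_port (card : Int) (connector : Int) (out : List (Int × Int × Int × Int)) : Prop := out = c2c_internal_connections_by_port_alt card connector
instance (card : Int) (connector : Int) (out : List (Int × Int × Int × Int)) : Decidable (Spec_c2c_internal_connections_by_port card connector out) := by unfold Spec_c2c_internal_connections_by_port; infer_instance

-- ===== CLAIM (what is proved, stated in full; the proofs are below) =====
def Claim_equal_c2c_internal_connections_by_port : Prop := ∀ (card : Int) (connector : Int), Dom_c2c_internal_connections_by_port card connector → Spec_c2c_internal_connections_by_port card connector (c2c_internal_connections_by_port card connector)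

-- ===== LEMMAS AND PROOFS =====

-- The 56 port endpoints occurring in the table (= the keys of pvPeer).
def pvKeys : List (Int × Int) := [((3:Int), (11:Int)), ((1:Int), (11:Int)), ((3:Int), (6:Int)), ((2:Int), (12:Int)), ((3:Int), (7:Int)), ((0:Int), (14:Int)), ((2:Int), (14:Int)), ((1:Int), (12:Int)), ((2:Int), (7:Int)), ((0:Int), (13:Int)), ((1:Int), (6:Int)), ((0:Int), (12:Int)), ((7:Int), (11:Int)), ((5:Int), (11:Int)), ((7:Int), (6:Int)), ((6:Int), (12:Int)), ((7:Int), (7:Int)), ((4:Int), (14:Int)), ((6:Int), (14:Int)), ((5:Int), (12:Int)), ((6:Int), (7:Int)), ((4:Int), (13:Int)), ((5:Int), (6:Int)), ((4:Int), (12:Int)), ((7:Int), (14:Int)), ((2:Int), (13:Int)), ((7:Int), (13:Int)), ((3:Int), (13:Int)), ((7:Int), (12:Int)), ((1:Int), (13:Int)), ((7:Int), (8:Int)), ((0:Int), (11:Int)), ((6:Int), (13:Int)), ((3:Int), (14:Int)), ((6:Int), (11:Int)), ((1:Int), (14:Int)), ((6:Int), (6:Int)), ((2:Int), (6:Int)),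 ((6:Int), (8:Int)), ((0:Int), (6:Int)), ((5:Int), (14:Int)), ((2:Int), (11:Int)), ((5:Int), (13:Int)), ((3:Int), (12:Int)), ((5:Int), (7:Int)), ((1:Int), (7:Int)), ((5:Int), (8:Int)), ((0:Int), (7:Int)), ((4:Int), (11:Int)), ((3:Int), (8:Int)), ((4:Int), (7:Int)), ((1:Int), (8:Int)), ((4:Int), (6:Int)), ((2:Int), (8:Int)), ((4:Int), (8:Int)), ((0:Int), (8:Int))]

-- What A appends for one row, as a function of the row.
def pvRow (card connector : Int) (conn : PySem.Dict String Int) : List (Int × Int × Int × Int) :=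
  if PySem.Dict.getD conn "card1" 0 = card ∧ PySem.Dict.getD conn "connector1" 0 = connector then
    [(card, connector, PySem.Dict.getD conn "card2" 0, PySem.Dict.getD conn "connector2" 0)]
  else if PySem.Dict.getD conn "card2" 0 = card ∧ PySem.Dict.getD conn "connector2" 0 = connector then
    [(card, connector, PySem.Dict.getD conn "card1" 0, PySem.Dict.getD conn "connector1" 0)]
  else []

lemma a_eq_flatMap (card connector : Int) :
    c2c_internal_connections_by_port card connector =
      internal_connections.flatMap (pvRow card connector) := by
  unfold c2c_internal_connections_by_port
  have h : internal_connections.foldl (fun results conn =>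
      if PySem.Dict.getD conn "card1" 0 = card ∧ PySem.Dict.getD conn "connector1" 0 = connector then
        results ++ [(card, connector, PySem.Dict.getD conn "card2" 0, PySem.Dict.getD conn "connector2" 0)]
      else if PySem.Dict.getD conn "card2" 0 = card ∧ PySem.Dict.getD conn "connector2" 0 = connector then
        results ++ [(card, connector, PySem.Dict.getD conn "card1" 0, PySem.Dict.getD conn "connector1" 0)]
      else results) [] =
      internal_connections.foldl (fun results conn => results ++ pvRow card connector conn) [] :=
    PySem.List.foldl_congr_mem _ _ _ _ (by intro acc conn _; unfold pvRow; split_ifs <;> simp)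
  refine h.trans ?_
  rw [PySem.List.foldl_append_eq_flatMap]
  simp

-- Every row's two endpoints are in pvKeys (a fact of the fixed table).
lemma endpoints_mem : ∀ conn ∈ internal_connections,
    (PySem.Dict.getD conn "card1" 0, PySem.Dict.getD conn "connector1" 0) ∈ pvKeys ∧
    (PySem.Dict.getD conn "card2" 0, PySem.Dict.getD conn "connector2" 0) ∈ pvKeys := by
  intro conn h; fin_cases h <;> exact ⟨by decide, by decide⟩

-- The keys of the peer map are exactly pvKeys.
set_option maxRecDepth 8192 in
lemma keys_pvPeer : pvPeer.keys = pvKeys := by decide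

-- Outside pvKeys both programs return [].
lemma off_keys (card connector : Int) (h : (card, connector) ∉ pvKeys) :
    c2c_internal_connections_by_port card connector = [] ∧
    c2c_internal_connections_by_port_alt card connector = [] := by
  constructor
  · rw [a_eq_flatMap, List.flatMap_eq_nil_iff]
    intro conn hc
    obtain ⟨h1, h2⟩ := endpoints_mem conn hc
    unfold pvRow
    split_ifs with e1 e2
    · rw [e1.1, e1.2] at h1; exact absurd h1 h
    · rw [e2.1, e2.2] at h2; exact absurd h2 h
    · rfl
  · unfold c2c_internal_connections_by_port_alt
    have : PySem.Dict.get? pvPeer (card, connector) = none := by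
      rw [PySem.Dict.get?_eq_none_iff_not_mem_keys, keys_pvPeer]; exact h
    rw [this]

-- ===== VERDICT (by name: the statement is the Claim_ definition above) =====
set_option maxRecDepth 8192 in
theorem c2c_internal_connections_by_port_spec : Claim_equal_c2c_internal_connections_by_port := by
  intro card connector _
  unfold Spec_c2c_internal_connections_by_port
  by_cases hmem : (card, connector) ∈ pvKeys
  · simp only [pvKeys, List.mem_cons, List.not_mem_nil, or_false, Prod.mk.injEq] at hmem
    rcases hmem with ⟨rfl, rfl⟩|⟨rfl, rfl⟩|⟨rfl, rfl⟩|⟨rfl, rfl⟩|⟨rfl, rfl⟩|⟨rfl, rfl⟩|⟨rfl, rfl⟩|⟨rfl, rfl⟩|⟨rfl, rfl⟩|⟨rfl, rfl⟩|⟨rfl, rfl⟩|⟨rfl, rfl⟩|⟨rfl, rfl⟩|⟨rfl, rfl⟩|⟨rfl, rfl⟩|⟨rfl, rfl⟩|⟨rfl, rfl⟩|⟨rfl, rfl⟩|⟨rfl, rfl⟩|⟨rfl, rfl⟩|⟨rfl, rfl⟩|⟨rfl, rfl⟩|⟨rfl, rfl⟩|⟨rfl, rfl⟩|⟨rfl,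 rfl⟩|⟨rfl, rfl⟩|⟨rfl, rfl⟩|⟨rfl, rfl⟩|⟨rfl, rfl⟩|⟨rfl, rfl⟩|⟨rfl, rfl⟩|⟨rfl, rfl⟩|⟨rfl, rfl⟩|⟨rfl, rfl⟩|⟨rfl, rfl⟩|⟨rfl, rfl⟩|⟨rfl, rfl⟩|⟨rfl, rfl⟩|⟨rfl, rfl⟩|⟨rfl, rfl⟩|⟨rfl, rfl⟩|⟨rfl, rfl⟩|⟨rfl, rfl⟩|⟨rfl, rfl⟩|⟨rfl, rfl⟩|⟨rfl, rfl⟩|⟨rfl, rfl⟩|⟨rfl, rfl⟩|⟨rfl, rfl⟩|⟨rfl, rfl⟩|⟨rfl, rfl⟩|⟨rfl, rfl⟩|⟨rfl, rfl⟩|⟨rfl, rfl⟩|⟨rfl, rfl⟩|⟨rfl, rfl⟩ <;> decide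
  · obtain ⟨ha, hb⟩ := off_keys card connector hmem
    rw [ha, hb]
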